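-- pv_equiv track=rewrite | github.com/msmcs-robotics/WayfindR-driver | ambot/online_scraper/cleaner.py | _remove_nav_link_runs
-- ===== SOURCE A (Python) =====
-- NAV_LINK_LINES = {
--     # Admissions / prospective student links
--     "Admissions FAQs", "Campus Map and Directions", "Admissions Events",
--     "Area Information", "Tuition and Estimated Costs", "Feature Stories",
--     "Honors Program", "Housing", "Professional Programs", "ROTC",
--     "Visit the Campus", "Student Blogs", "Clubs and Organizations",
--     "Summer Camps", "Embry-Riddle Language Institute (ERLI)",
--     # Current student links
--     "Academic Calendar", "Bookstore", "Campus Directory", "Career Services",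
--     "Counseling", "Course Catalog", "Dean of Students",
--     "Student Accessibility Services", "EagleCard", "ERNIE Central",
--     "Financial Aid", "Health & Wellness", "Library",
--     "Office of the Registrar", "Safety and Security",
--     "Student Financial Services", "Academic Advancement Center (Tutoring)",
--     # Other site-wide links
--     "Parents & Family", "Future Students", "Veteran Student Services",
--     "Alumni Engagement", "Athletics", "Libraries", "Scholarly Commons",
--     "Research at Embry-Riddle", "Faculty Directory",
--     "Daytona Beach, FL Campus", "Prescott, AZ Campus",
--     "Worldwide Campus", "Online Campus", "Asia Campus",
--     "Lift Magazine", "Giving to Embry-Riddle", "Crowdfunding",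
--     "Awards and Fellowships", "Professional Education",
--     "K-12 / Dual Enrollment / Summer Camps", "Speaker Series",
--     "International Education", "Working at Embry-Riddle",
--     "Board of Trustees", "Accreditation", "Consumer Information",
--     "California Disclosures",
--     # CTA / action buttons
--     "Apply Now", "Read more", "Read More",
--     "Support Your Department",
-- }
--
-- def _remove_nav_link_runs(lines: list[str]) -> list[str]:
--     """Remove runs of navigation link lines.
--
--     Navigation links appear as standalone lines (one link per line).
--     We detect runs of 4+ consecutive nav-link lines (with optional
--     blank lines between them) and remove the whole block.
--     """
--     result = []
--     i = 0
--     while i < len(lines):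
--         stripped = lines[i].strip()
--         if stripped in NAV_LINK_LINES:
--             # Look ahead to see if this is a sustained run
--             run_start = i
--             j = i
--             nav_count = 0
--             while j < len(lines):
--                 s = lines[j].strip()
--                 if s == "":
--                     j += 1
--                     continue
--                 if s in NAV_LINK_LINES:
--                     nav_count += 1
--                     j += 1
--                 else:
--                     break
--
--             # Remove if 4+ nav links in a row (scattered single matches are kept)
--             if nav_count >= 4:
--                 i = j
--                 continue
--
--         result.append(lines[i])
--         i += 1
--
--     return result
-- ===== SOURCE B (Python) =====
-- NAV_LINK_LINES = {
--     # Admissions / prospective student links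
--     "Admissions FAQs", "Campus Map and Directions", "Admissions Events",
--     "Area Information", "Tuition and Estimated Costs", "Feature Stories",
--     "Honors Program", "Housing", "Professional Programs", "ROTC",
--     "Visit the Campus", "Student Blogs", "Clubs and Organizations",
--     "Summer Camps", "Embry-Riddle Language Institute (ERLI)",
--     # Current student links
--     "Academic Calendar", "Bookstore", "Campus Directory", "Career Services",
--     "Counseling", "Course Catalog", "Dean of Students",
--     "Student Accessibility Services", "EagleCard", "ERNIE Central",
--     "Financial Aid", "Health & Wellness", "Library",
--     "Office of the Registrar", "Safety and Security",
--     "Student Financial Services", "Academic Advancement Center (Tutoring)",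
--     # Other site-wide links
--     "Parents & Family", "Future Students", "Veteran Student Services",
--     "Alumni Engagement", "Athletics", "Libraries", "Scholarly Commons",
--     "Research at Embry-Riddle", "Faculty Directory",
--     "Daytona Beach, FL Campus", "Prescott, AZ Campus",
--     "Worldwide Campus", "Online Campus", "Asia Campus",
--     "Lift Magazine", "Giving to Embry-Riddle", "Crowdfunding",
--     "Awards and Fellowships", "Professional Education",
--     "K-12 / Dual Enrollment / Summer Camps", "Speaker Series",
--     "International Education", "Working at Embry-Riddle",
--     "Board of Trustees", "Accreditation", "Consumer Information",
--     "California Disclosures",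
--     # CTA / action buttons
--     "Apply Now", "Read more", "Read More",
--     "Support Your Department",
-- }
--
--
-- def _flush(buf):
--     """Emit a buffered run of blank/nav lines: if it holds 4+ nav links,
--     keep only the blanks before the first nav line; otherwise keep it all."""
--     if sum(1 for l in buf if l.strip() in NAV_LINK_LINES) >= 4:
--         kept = []
--         for l in buf:
--             if l.strip() in NAV_LINK_LINES:
--                 break
--             kept.append(l)
--         return kept
--     return buf
--
--
-- def _remove_nav_link_runs(lines: list[str]) -> list[str]:
--     """Remove runs of 4+ consecutive nav-link lines (blank lines may sit
--     between them) in a single forward pass with a pending buffer."""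
--     result = []
--     buf = []
--     for line in lines:
--         s = line.strip()
--         if s == "" or s in NAV_LINK_LINES:
--             buf.append(line)
--         else:
--             result += _flush(buf)
--             buf = []
--             result.append(line)
--     result += _flush(buf)
--     return result
-- ===== Notes on version B (the rewrite author's own statement) =====
-- stated objective: simpler
-- what changed: Replaced A's index-based while-loop with a nested look-ahead re-scan at every nav line by a single forward pass that buffers consecutive blank/nav lines and flushes the buffer (dropping everything from its first nav line on when it holds 4+ nav lines) at each ordinary line and at end of input.
import Mathlib
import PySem

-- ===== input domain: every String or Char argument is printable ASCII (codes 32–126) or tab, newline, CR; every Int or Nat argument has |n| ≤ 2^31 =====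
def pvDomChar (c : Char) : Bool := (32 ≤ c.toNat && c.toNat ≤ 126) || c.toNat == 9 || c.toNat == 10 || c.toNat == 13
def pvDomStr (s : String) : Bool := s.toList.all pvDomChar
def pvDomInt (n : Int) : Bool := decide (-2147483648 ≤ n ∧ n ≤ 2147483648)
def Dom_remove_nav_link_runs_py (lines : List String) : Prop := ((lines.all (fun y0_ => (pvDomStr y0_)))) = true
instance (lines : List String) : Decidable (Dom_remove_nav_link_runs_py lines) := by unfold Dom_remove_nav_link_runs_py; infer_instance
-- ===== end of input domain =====

-- B replaces A's index-based look-ahead re-scan by one forward pass with a pending buffer of blank/nav lines; objective: simpler.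

set_option maxRecDepth 8192


-- module constant NAV_LINK_LINES (a Python set of string literals)
def NAV_LINK_LINES : PySem.Set String := PySem.Set.ofList [
    "Admissions FAQs",
    "Campus Map and Directions",
    "Admissions Events",
    "Area Information",
    "Tuition and Estimated Costs",
    "Feature Stories",
    "Honors Program",
    "Housing",
    "Professional Programs",
    "ROTC",
    "Visit the Campus",
    "Student Blogs",
    "Clubs and Organizations",
    "Summer Camps",
    "Embry-Riddle Language Institute (ERLI)",
    "Academic Calendar",
    "Bookstore",
    "Campus Directory",
    "Career Services",
    "Counseling",
    "Course Catalog",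
    "Dean of Students",
    "Student Accessibility Services",
    "EagleCard",
    "ERNIE Central",
    "Financial Aid",
    "Health & Wellness",
    "Library",
    "Office of the Registrar",
    "Safety and Security",
    "Student Financial Services",
    "Academic Advancement Center (Tutoring)",
    "Parents & Family",
    "Future Students",
    "Veteran Student Services",
    "Alumni Engagement",
    "Athletics",
    "Libraries",
    "Scholarly Commons",
    "Research at Embry-Riddle",
    "Faculty Directory",
    "Daytona Beach, FL Campus",
    "Prescott, AZ Campus",
    "Worldwide Campus",
    "Online Campus",
    "Asia Campus",
    "Lift Magazine",
    "Giving to Embry-Riddle",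
    "Crowdfunding",
    "Awards and Fellowships",
    "Professional Education",
    "K-12 / Dual Enrollment / Summer Camps",
    "Speaker Series",
    "International Education",
    "Working at Embry-Riddle",
    "Board of Trustees",
    "Accreditation",
    "Consumer Information",
    "California Disclosures",
    "Apply Now",
    "Read more",
    "Read More",
    "Support Your Department"
]

-- 'line.strip() in NAV_LINK_LINES' / 'line.strip() == ""' (shared by both Pythons)
def isNavLine (l : String) : Bool := decide (PySem.Str.strip l ∈ NAV_LINK_LINES)
def isBlank (l : String) : Bool := PySem.Str.strip l == ""

-- ===== PORT A =====
-- A's inner while loop from position j: skip blank lines, count nav lines, stop at the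
-- first other line; returns (nav_count, remaining suffix from the stopping position).
def scanRun : List String → Nat × List String
  | [] => (0, [])
  | l :: rest =>
    if isBlank l then scanRun rest
    else if isNavLine l then ((scanRun rest).1 + 1, (scanRun rest).2)
    else (0, l :: rest)

theorem scanRun_len_le (xs : List String) : (scanRun xs).2.length ≤ xs.length := by
  induction xs with
  | nil => simp [scanRun]
  | cons l rest ih =>
    simp only [scanRun]
    split_ifs <;> simp <;> omega

theorem blank_not_nav (b : String) (h : isBlank b = true) : isNavLine b = false := by
  have hs : PySem.Str.strip b = "" := by simpa [isBlank] using h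
  simp only [isNavLine, hs]
  decide

theorem scanRun_len_lt (l : String) (rest : List String) (h : isNavLine l = true) :
    (scanRun (l :: rest)).2.length < (l :: rest).length := by
  have hb : isBlank l = false := by
    cases hib : isBlank l with
    | false => rfl
    | true => rw [blank_not_nav l hib] at h; exact absurd h (by simp)
  simp only [scanRun, hb, h, if_pos, if_neg, Bool.false_eq_true, if_false, if_true]
  exact Nat.lt_succ_of_le (scanRun_len_le rest)

-- A's outer while loop over the suffix of 'lines' starting at index i.
def remove_nav_link_runs_py : List String → List String
  | [] => []
  | l :: rest =>
    if h : isNavLine l = true then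
      if 4 ≤ (scanRun (l :: rest)).1 then
        remove_nav_link_runs_py (scanRun (l :: rest)).2
      else
        l :: remove_nav_link_runs_py rest
    else
      l :: remove_nav_link_runs_py rest
termination_by xs => xs.length
decreasing_by
  · exact scanRun_len_lt l rest h
  · simp
  · simp

-- ===== PORT B =====
-- _flush(buf): keep only the lines before the first nav line when buf holds 4+ nav lines
def flushBuf (buf : List String) : List String :=
  if 4 ≤ buf.countP isNavLine then buf.takeWhile (fun l => !isNavLine l) else buf

-- the for-loop of B, carrying (already emitted output implicit) the pending buffer
def goAlt (buf : List String) : List String → List String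
  | [] => flushBuf buf
  | l :: rest =>
    if isBlank l || isNavLine l then goAlt (buf ++ [l]) rest
    else flushBuf buf ++ l :: goAlt [] rest

def remove_nav_link_runs_py_alt (lines : List String) : List String := goAlt [] lines

-- ===== PRECONDITION & SPEC =====
def Spec_remove_nav_link_runs_py (lines : List String) (out : List String) : Prop := out = remove_nav_link_runs_py_alt lines
instance (lines : List String) (out : List String) : Decidable (Spec_remove_nav_link_runs_py lines out) := by unfold Spec_remove_nav_link_runs_py; infer_instance

-- ===== CLAIM (what is proved, stated in full; the proofs are below) =====
def Claim_equal_remove_nav_link_runs_py : Prop := ∀ (lines : List String), Dom_remove_nav_link_runs_py lines → Spec_remove_nav_link_runs_py lines (remove_nav_link_runs_py lines)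

-- ===== LEMMAS AND PROOFS =====

-- one-step unfolding of A's outer loop on a nonempty list
theorem goA_cons (l : String) (rest : List String) :
    remove_nav_link_runs_py (l :: rest) =
      if isNavLine l then
        (if 4 ≤ (scanRun (l :: rest)).1 then remove_nav_link_runs_py (scanRun (l :: rest)).2
         else l :: remove_nav_link_runs_py rest)
      else l :: remove_nav_link_runs_py rest := by
  rw [remove_nav_link_runs_py.eq_2]
  simp only [dite_eq_ite]

-- a buffered line is blank or a nav line
def BN (l : String) : Prop := isBlank l = true ∨ isNavLine l = true

theorem nav_not_blank (b : String) (h : isNavLine b = true) : isBlank b = false := by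
  cases hib : isBlank b with
  | false => rfl
  | true => rw [blank_not_nav b hib] at h; exact absurd h (by simp)

theorem scanRun_bn_append (buf : List String) (hbuf : ∀ b ∈ buf, BN b)
    (l : String) (hb : isBlank l = false) (hn : isNavLine l = false) (rest : List String) :
    scanRun (buf ++ l :: rest) = (buf.countP isNavLine, l :: rest) := by
  induction buf with
  | nil => simp [scanRun, hb, hn]
  | cons b buf' ih =>
    have ih' := ih (fun x hx => hbuf x (by simp [hx]))
    rcases hbuf b (by simp) with h1 | h1
    · simp [scanRun, h1, ih', List.countP_cons, blank_not_nav b h1]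
    · simp [scanRun, nav_not_blank b h1, h1, ih', List.countP_cons]

theorem scanRun_bn_nil (buf : List String) (hbuf : ∀ b ∈ buf, BN b) :
    scanRun buf = (buf.countP isNavLine, []) := by
  induction buf with
  | nil => simp [scanRun]
  | cons b buf' ih =>
    have ih' := ih (fun x hx => hbuf x (by simp [hx]))
    rcases hbuf b (by simp) with h1 | h1
    · simp [scanRun, h1, ih', List.countP_cons, blank_not_nav b h1]
    · simp [scanRun, nav_not_blank b h1, h1, ih', List.countP_cons]

theorem flushBuf_cons_blank (b : String) (buf : List String) (h : isBlank b = true) :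
    flushBuf (b :: buf) = b :: flushBuf buf := by
  have hn := blank_not_nav b h
  simp [flushBuf, List.countP_cons, hn, List.takeWhile]
  split_ifs <;> simp

-- if the whole list is blank/nav lines, A's loop reduces to one flush
theorem goA_bn (buf : List String) (hbuf : ∀ b ∈ buf, BN b) :
    remove_nav_link_runs_py buf = flushBuf buf := by
  induction buf with
  | nil => simp [remove_nav_link_runs_py, flushBuf]
  | cons b buf' ih =>
    have ih' := ih (fun x hx => hbuf x (by simp [hx]))
    rcases hbuf b (by simp) with h1 | h1
    · rw [goA_cons, flushBuf_cons_blank b buf' h1]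
      simp [blank_not_nav b h1, ih']
    · rw [goA_cons, scanRun_bn_nil (b :: buf') hbuf]
      simp only [h1, if_true]
      by_cases hc : 4 ≤ (b :: buf').countP isNavLine
      · have hc3 : 3 ≤ buf'.countP isNavLine := by
          simp [List.countP_cons, h1] at hc; omega
        simp only [hc, if_pos]
        rw [remove_nav_link_runs_py]
        simp [flushBuf, hc, List.takeWhile, h1, hc3]
      · simp only [hc, if_neg, ih']
        have hc' : ¬ 4 ≤ buf'.countP isNavLine := by
          simp only [List.countP_cons] at hc; omega
        simp [flushBuf, hc, hc']

-- A's loop over a blank/nav buffer followed by an ordinary line flushes the buffer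
theorem goA_bn_append (buf : List String) (hbuf : ∀ b ∈ buf, BN b)
    (l : String) (hb : isBlank l = false) (hn : isNavLine l = false) (rest : List String) :
    remove_nav_link_runs_py (buf ++ l :: rest) =
      flushBuf buf ++ l :: remove_nav_link_runs_py rest := by
  induction buf with
  | nil => rw [List.nil_append, goA_cons]; simp [hn, flushBuf]
  | cons b buf' ih =>
    have ih' := ih (fun x hx => hbuf x (by simp [hx]))
    rcases hbuf b (by simp) with h1 | h1
    · rw [List.cons_append, goA_cons, flushBuf_cons_blank b buf' h1]
      simp [blank_not_nav b h1, ih']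
    · rw [List.cons_append, goA_cons,
          show b :: (buf' ++ l :: rest) = (b :: buf') ++ l :: rest from rfl,
          scanRun_bn_append (b :: buf') hbuf l hb hn rest]
      simp only [h1, if_true]
      by_cases hc : 4 ≤ (b :: buf').countP isNavLine
      · have hc3 : 3 ≤ buf'.countP isNavLine := by
          simp [List.countP_cons, h1] at hc; omega
        simp only [hc, if_pos]
        rw [goA_cons]
        simp [hn, flushBuf, hc, List.takeWhile, h1, hc3]
      · simp only [hc, if_neg, ih']
        have hc' : ¬ 4 ≤ buf'.countP isNavLine := by
          simp only [List.countP_cons] at hc; omega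
        simp [flushBuf, hc, hc']

-- main invariant: A on (pending buffer ++ remaining input) is B's loop state
theorem goA_eq_goAlt (xs buf : List String) (hbuf : ∀ b ∈ buf, BN b) :
    remove_nav_link_runs_py (buf ++ xs) = goAlt buf xs := by
  induction xs generalizing buf with
  | nil => rw [List.append_nil]; exact goA_bn buf hbuf
  | cons l rest ih =>
    by_cases hbn : (isBlank l || isNavLine l) = true
    · rw [goAlt]
      simp only [hbn, if_pos]
      rw [← ih (buf ++ [l]) ?_]
      · rw [List.append_assoc]; rfl
      · intro b hbm
        rcases List.mem_append.mp hbm with h | h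
        · exact hbuf b h
        · have hbl : b = l := by simpa using h
          subst hbl
          rcases Bool.or_eq_true_iff.mp hbn with h | h
          · exact Or.inl h
          · exact Or.inr h
    · have hb : isBlank l = false := by
        cases h : isBlank l <;> simp [h] at hbn ⊢
      have hn : isNavLine l = false := by
        cases h : isNavLine l <;> simp [h, hb] at hbn ⊢
      rw [goAlt]
      simp only [hbn, if_neg, Bool.false_eq_true, if_false]
      have h2 := ih [] (by simp [BN])
      simp only [List.nil_append] at h2
      rw [goA_bn_append buf hbuf l hb hn rest, h2]

-- ===== VERDICT (by name: the statement is the Claim_ definition above) =====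
theorem remove_nav_link_runs_py_spec : Claim_equal_remove_nav_link_runs_py := by
  intro lines _
  unfold Spec_remove_nav_link_runs_py remove_nav_link_runs_py_alt
  simpa using goA_eq_goAlt lines [] (by simp [BN])
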